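-- pv_equiv track=rewrite | github.com/KKenK/AoC_2024_day_3 | part_1.py | seven_char_digit_pair_str_checker
-- ===== SOURCE A (Python) =====
-- def seven_char_digit_pair_str_checker(chars):
--
--     potentially_valid_int_pair_str = ""
--
--     last_char_index = len(chars) - 1
--
--     if last_char_index > 8:
--         last_char_index = 8
--
--     for x in range(last_char_index):
--
--         current_char = chars[x]
--
--         if not current_char.isdigit() and not current_char == ",":
--
--             if current_char == ")":
--                 return potentially_valid_int_pair_str
--
--             return ""
--
--         potentially_valid_int_pair_str += current_char
--
--     if not chars[last_char_index] == ")":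
--         return ""
--
--     return potentially_valid_int_pair_str
-- ===== SOURCE B (Python) =====
-- def seven_char_digit_pair_str_checker(chars):
--     # Two-phase: locate first ')' in the 9-char window, then validate the prefix.
--     window = chars[:9]
--     i = window.find(')')
--     if i == -1:
--         return ""
--     prefix = window[:i]
--     if all(c.isdigit() or c == ',' for c in prefix):
--         return prefix
--     return ""
-- ===== Notes on version B (the rewrite author's own statement) =====
-- stated objective: alternative
-- what changed: Replaces A's single fused early-returning index loop (validate chars one by one, accumulate, then check the clamped last char) with a two-phase structure: locate the first closing parenthesis in the 9-char window, then validate the prefix before it in one pass.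
import Mathlib
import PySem

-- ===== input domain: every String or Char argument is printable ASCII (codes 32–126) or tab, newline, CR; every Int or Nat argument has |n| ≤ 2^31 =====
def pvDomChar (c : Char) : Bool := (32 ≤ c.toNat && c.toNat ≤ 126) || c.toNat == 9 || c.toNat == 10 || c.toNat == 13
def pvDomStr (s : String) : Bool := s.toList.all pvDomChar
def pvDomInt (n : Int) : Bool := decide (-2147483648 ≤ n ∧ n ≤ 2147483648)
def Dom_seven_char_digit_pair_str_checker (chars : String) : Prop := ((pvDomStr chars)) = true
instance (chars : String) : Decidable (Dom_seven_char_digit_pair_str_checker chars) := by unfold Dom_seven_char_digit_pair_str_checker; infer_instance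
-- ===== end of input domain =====

-- B replaces A's fused early-returning scan by a two-phase structure (locate the first closing parenthesis in the
-- 9-char window, then validate the prefix); same cost, different decomposition.

-- ===== PORT A =====
-- A's for-loop over range(last_char_index): early return is the Sum.inl branch,
-- Sum.inr carries the accumulator when the loop finishes normally.
def sevenGo : List Char → List Char → (List Char ⊕ List Char)
  | [], acc => Sum.inr acc
  | c :: rest, acc =>
    if ¬ PySem.Chars.isdigit c ∧ ¬ (c = ',') then
      (if c = ')' then Sum.inl acc else Sum.inl [])
    else sevenGo rest (acc ++ [c])

def seven_char_digit_pair_str_checker (chars : String) : String :=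
  let cs := chars.toList
  let lci0 : Int := PySem.Str.len chars - 1
  let lci : Int := if lci0 > 8 then 8 else lci0
  match sevenGo (cs.take lci.toNat) [] with
  | Sum.inl r => String.ofList r
  | Sum.inr acc =>
    match PySem.List.pyGet? cs lci with
    | none => ""   -- Python raises IndexError here (only for chars = ""); excluded by Pre_
    | some c => if ¬ (c = ')') then "" else String.ofList acc

-- ===== PORT B =====
def pvValid (c : Char) : Bool := PySem.Chars.isdigit c || c == ','

def seven_char_digit_pair_str_checker_alt (chars : String) : String :=
  let w := PySem.List.slice chars.toList none (some 9)   -- window = chars[:9]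
  let i := PySem.Chars.find w [')']                      -- i = window.find(')')
  if i = -1 then ""
  else
    let pre := PySem.List.slice w none (some i)          -- prefix = window[:i]
    if pre.all pvValid then String.ofList pre else ""

-- ===== PRECONDITION & SPEC =====
-- Pre_ excludes only the empty string, on which A raises IndexError (chars[-1]).
def Pre_seven_char_digit_pair_str_checker (chars : String) : Prop := chars ≠ ""
instance (chars : String) : Decidable (Pre_seven_char_digit_pair_str_checker chars) := by unfold Pre_seven_char_digit_pair_str_checker; infer_instance
def pvWitness_seven_char_digit_pair_str_checker : String := "12,34)x"

def Spec_seven_char_digit_pair_str_checker (chars : String) (out : String) : Prop := out = seven_char_digit_pair_str_checker_alt chars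
instance (chars : String) (out : String) : Decidable (Spec_seven_char_digit_pair_str_checker chars out) := by unfold Spec_seven_char_digit_pair_str_checker; infer_instance

-- ===== CLAIM (what is proved, stated in full; the proofs are below) =====
def Claim_equal_seven_char_digit_pair_str_checker : Prop := ∀ (chars : String), Dom_seven_char_digit_pair_str_checker chars → Pre_seven_char_digit_pair_str_checker chars → Spec_seven_char_digit_pair_str_checker chars (seven_char_digit_pair_str_checker chars)

-- ===== LEMMAS AND PROOFS =====

-- the loop skips a block of valid characters, appending them to the accumulator
lemma sevenGo_append_valid (tw : List Char) (rest acc : List Char)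
    (h : ∀ c ∈ tw, pvValid c = true) :
    sevenGo (tw ++ rest) acc = sevenGo rest (acc ++ tw) := by
  induction tw generalizing acc with
  | nil => simp
  | cons c tw ih =>
    have hc : pvValid c = true := h c (by simp)
    have : ¬ (¬ PySem.Chars.isdigit c ∧ ¬ (c = ',')) := by
      simp [pvValid] at hc
      rcases hc with hc | hc <;> simp [hc]
    simp only [List.cons_append, sevenGo, if_neg this]
    rw [ih _ (fun x hx => h x (by simp [hx]))]
    simp

lemma sevenGo_invalid (c : Char) (rest acc : List Char) (h : pvValid c = false) :
    sevenGo (c :: rest) acc = (if c = ')' then Sum.inl acc else Sum.inl []) := by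
  have : ¬ PySem.Chars.isdigit c ∧ ¬ (c = ',') := by
    simp [pvValid] at h; exact ⟨by simp [h.1], by simp [h.2]⟩
  rw [sevenGo, if_pos this]

lemma sevenGo_all_valid (tw acc : List Char) (h : ∀ c ∈ tw, pvValid c = true) :
    sevenGo tw acc = Sum.inr (acc ++ tw) := by
  have := sevenGo_append_valid tw [] acc h
  simpa [sevenGo] using this

lemma singleton_prefix_iff (c : Char) (l : List Char) : [c] <+: l ↔ l.head? = some c := by
  cases l with
  | nil => simp
  | cons a t => simp [List.prefix_cons_iff, eq_comm]

lemma singleton_prefix_drop (c : Char) (l : List Char) (j : Nat) :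
    [c] <+: l.drop j ↔ l[j]? = some c := by
  rw [singleton_prefix_iff, List.head?_drop]

lemma take_append_cons (l₁ l₂ : List Char) (c : Char) (n : Nat) (h : l₁.length < n) :
    (l₁ ++ c :: l₂).take n = l₁ ++ c :: l₂.take (n - l₁.length - 1) := by
  obtain ⟨m, hm⟩ : ∃ m, n - l₁.length = m + 1 := ⟨n - l₁.length - 1, by omega⟩
  conv_lhs => rw [show n = l₁.length + (m + 1) from by omega]
  rw [List.take_length_add_append, List.take_succ_cons, show n - l₁.length - 1 = m from by omega]

-- the core equivalence, on the 9-char window w (any nonempty list)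
lemma core (w : List Char) (hw : w ≠ []) :
    (match sevenGo (w.take (w.length - 1)) [] with
     | Sum.inl r => r
     | Sum.inr acc =>
       match w[w.length - 1]? with
       | some c => if ¬ (c = ')') then [] else acc
       | none => []) =
    (if PySem.Chars.find w [')'] = -1 then []
     else if (w.take (PySem.Chars.find w [')']).toNat).all pvValid
          then w.take (PySem.Chars.find w [')']).toNat else []) := by
  have hlen : 0 < w.length := List.length_pos_of_ne_nil hw
  have hsplit : w.takeWhile pvValid ++ w.dropWhile pvValid = w := List.takeWhile_append_dropWhile
  have htwv : ∀ c ∈ w.takeWhile pvValid, pvValid c = true := fun c hc => List.mem_takeWhile_imp hc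
  cases hdc : w.dropWhile pvValid with
  | nil =>
    have hall : ∀ c ∈ w, pvValid c = true := by
      intro c hc
      rw [← hsplit, hdc, List.append_nil] at hc
      exact htwv c hc
    have hfind : PySem.Chars.find w [')'] = -1 := by
      rw [PySem.Chars.find_eq_neg_one_iff]
      intro hinf
      exact absurd (hall ')' (hinf.subset (by simp))) (by decide)
    have hgo := sevenGo_all_valid (w.take (w.length - 1)) []
      (fun c hc => hall c (List.mem_of_mem_take hc))
    have hlast : w[w.length - 1]? = some (w[w.length - 1]'(by omega)) :=
      List.getElem?_eq_getElem (by omega)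
    have hlv : pvValid (w[w.length - 1]'(by omega)) = true := hall _ (List.getElem_mem _)
    have hlne : ¬ ((w[w.length - 1]'(by omega)) = ')') := fun h => absurd (h ▸ hlv) (by decide)
    simp [hfind, hgo, hlast, hlne]
  | cons c d' =>
    have hcv : pvValid c = false := by
      have := List.head_dropWhile_not (l := w) pvValid (by simp [hdc])
      simp only [hdc, List.head_cons] at this
      exact this
    have hcne : ¬ PySem.Chars.isdigit c ∧ ¬ (c = ',') := by
      simp [pvValid] at hcv
      exact ⟨by simp [hcv.1], by simp [hcv.2]⟩
    set k := (w.takeWhile pvValid).length with hkdef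
    have hklt : k < w.length := by
      conv_rhs => rw [← hsplit, hdc]
      simp [hkdef]
    have hwk : w[k]? = some c := by
      conv_lhs => rw [← hsplit, hdc]
      simp [hkdef]
    have hvalt : ∀ j, j < k → ∀ x, w[j]? = some x → pvValid x = true := by
      intro j hj x hx
      conv_lhs at hx => rw [← hsplit]
      rw [List.getElem?_append_left (by simpa [hkdef] using hj)] at hx
      exact htwv x (List.mem_of_getElem? hx)
    have htake_k : w.take k = w.takeWhile pvValid := by
      conv_lhs => rw [← hsplit]
      exact List.take_left
    have htw_all : (w.takeWhile pvValid).all pvValid = true := List.all_eq_true.mpr htwv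
    -- the loop body of A, in the two positions the first invalid char can occupy
    have hgo_lt : k < w.length - 1 →
        sevenGo (w.take (w.length - 1)) [] =
          (if c = ')' then Sum.inl (w.takeWhile pvValid) else Sum.inl []) := by
      intro hlt
      have hw' : w = w.takeWhile pvValid ++ c :: d' := by
        conv_lhs => rw [← hsplit, hdc]
      have hsplit2 : w.take (w.length - 1) =
          w.takeWhile pvValid ++ c :: d'.take (w.length - 1 - k - 1) := by
        rw [congrArg (List.take (w.length - 1)) hw',
            take_append_cons _ _ _ _ (by omega), ← hkdef]
      rw [hsplit2, sevenGo_append_valid _ _ [] htwv, sevenGo_invalid _ _ _ hcv]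
      simp
    have hgo_eq : k = w.length - 1 →
        sevenGo (w.take (w.length - 1)) [] = Sum.inr (w.takeWhile pvValid) := by
      intro heq
      rw [← heq, htake_k, sevenGo_all_valid _ [] htwv]
      simp
    by_cases hcp : c = ')'
    · -- the first invalid char is ')': both sides return the valid prefix
      have hinf : [')'] <:+: w := by
        refine ⟨w.takeWhile pvValid, d', ?_⟩
        conv_rhs => rw [← hsplit, hdc, hcp]
        simp
      have hge : 0 ≤ PySem.Chars.find w [')'] := (PySem.Chars.find_nonneg_iff _ _).mpr hinf
      obtain ⟨hpref, hmin⟩ := PySem.Chars.find_spec (s := w) (sub := [')']) hge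
      have h1 : w[(PySem.Chars.find w [')']).toNat]? = some ')' :=
        (singleton_prefix_drop _ _ _).mp hpref
      have hfk : (PySem.Chars.find w [')']).toNat = k := by
        rcases lt_trichotomy (PySem.Chars.find w [')']).toNat k with h | h | h
        · exact absurd (hvalt _ h _ h1) (by decide)
        · exact h
        · exact absurd ((singleton_prefix_drop _ _ _).mpr (by rw [hwk, hcp])) (hmin k h)
      have hne1 : ¬ (PySem.Chars.find w [')'] = -1) := by omega
      rw [if_neg hne1, hfk, htake_k, if_pos htw_all]
      rcases Nat.lt_or_ge k (w.length - 1) with hlt | hge2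
      · simp only [hgo_lt hlt, if_pos hcp]
      · have heq : k = w.length - 1 := by omega
        have hlast : w[w.length - 1]? = some c := heq ▸ hwk
        simp [hgo_eq heq, hlast, hcp]
    · -- the first invalid char is not ')': both sides return []
      have hLHS : (match sevenGo (w.take (w.length - 1)) [] with
          | Sum.inl r => r
          | Sum.inr acc =>
            match w[w.length - 1]? with
            | some c => if ¬ (c = ')') then [] else acc
            | none => []) = ([] : List Char) := by
        rcases Nat.lt_or_ge k (w.length - 1) with hlt | hge2
        · simp only [hgo_lt hlt, if_neg hcp]
        · have heq : k = w.length - 1 := by omega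
          have hlast : w[w.length - 1]? = some c := heq ▸ hwk
          simp only [hgo_eq heq, hlast, if_pos hcp]
      rw [hLHS]
      by_cases hfind : PySem.Chars.find w [')'] = -1
      · rw [if_pos hfind]
      · have hge : 0 ≤ PySem.Chars.find w [')'] := by
          have := PySem.Chars.neg_one_le_find (s := w) (sub := [')'])
          omega
        obtain ⟨hpref, hmin⟩ := PySem.Chars.find_spec (s := w) (sub := [')']) hge
        have h1 : w[(PySem.Chars.find w [')']).toNat]? = some ')' :=
          (singleton_prefix_drop _ _ _).mp hpref
        have hkf : k < (PySem.Chars.find w [')']).toNat := by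
          rcases lt_trichotomy (PySem.Chars.find w [')']).toNat k with h | h | h
          · exact absurd (hvalt _ h _ h1) (by decide)
          · exfalso
            rw [← h, h1] at hwk
            exact hcp (Option.some_inj.mp hwk).symm
          · exact h
        have hallf : (w.take (PySem.Chars.find w [')']).toNat).all pvValid = false := by
          rw [Bool.eq_false_iff]
          intro hall
          have hcmem : c ∈ w.take (PySem.Chars.find w [')']).toNat :=
            List.mem_of_getElem? (by rw [List.getElem?_take_of_lt hkf, hwk])
          exact absurd (List.all_eq_true.mp hall c hcmem) (by simp [hcv])
        rw [if_neg hfind, if_neg (by simp [hallf])]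

theorem seven_char_digit_pair_str_checker_spec_aux (chars : String)
    (hpre : chars ≠ "") :
    seven_char_digit_pair_str_checker chars = seven_char_digit_pair_str_checker_alt chars := by
  have hne : chars.toList ≠ [] := by simpa using hpre
  have hn : 0 < chars.toList.length := List.length_pos_of_ne_nil hne
  have hwlen : (chars.toList.take 9).length = min 9 chars.toList.length := List.length_take
  have hwne : chars.toList.take 9 ≠ [] := List.ne_nil_of_length_pos (by omega)
  have hsl : PySem.Str.len chars = (chars.toList.length : Int) := by simp [pysem]
  have hlci : (if PySem.Str.len chars - 1 > 8 then 8 else PySem.Str.len chars - 1)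
      = (((chars.toList.take 9).length - 1 : Nat) : Int) := by
    rw [hsl, hwlen]
    split_ifs with h <;> omega
  have htakeA : chars.toList.take ((((chars.toList.take 9).length - 1 : Nat) : Int)).toNat
      = (chars.toList.take 9).take ((chars.toList.take 9).length - 1) := by
    rw [Int.toNat_natCast]
    conv_rhs => rw [List.take_take]
    congr 1
    simp only [hwlen]
    omega
  have hgetA : PySem.List.pyGet? chars.toList ((((chars.toList.take 9).length - 1 : Nat)) : Int)
      = (chars.toList.take 9)[(chars.toList.take 9).length - 1]? := by
    rw [PySem.List.pyGet?_natCast, List.getElem?_take_of_lt (by simp only [hwlen]; omega)]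
  have hA : seven_char_digit_pair_str_checker chars = String.ofList
      (match sevenGo ((chars.toList.take 9).take ((chars.toList.take 9).length - 1)) [] with
       | Sum.inl r => r
       | Sum.inr acc =>
         match (chars.toList.take 9)[(chars.toList.take 9).length - 1]? with
         | some c => if ¬ (c = ')') then [] else acc
         | none => []) := by
    simp only [seven_char_digit_pair_str_checker]
    rw [hlci, htakeA, hgetA]
    cases hgo : sevenGo ((chars.toList.take 9).take ((chars.toList.take 9).length - 1)) [] with
    | inl r => rfl
    | inr acc =>
      have hlast : (chars.toList.take 9)[(chars.toList.take 9).length - 1]?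
          = some ((chars.toList.take 9)[(chars.toList.take 9).length - 1]'(by omega)) :=
        List.getElem?_eq_getElem (by omega)
      simp only [hlast]
      split_ifs <;> rfl
  have hB : seven_char_digit_pair_str_checker_alt chars = String.ofList
      (if PySem.Chars.find (chars.toList.take 9) [')'] = -1 then []
       else if ((chars.toList.take 9).take (PySem.Chars.find (chars.toList.take 9) [')']).toNat).all pvValid
            then (chars.toList.take 9).take (PySem.Chars.find (chars.toList.take 9) [')']).toNat else []) := by
    simp only [seven_char_digit_pair_str_checker_alt]
    have hsl9 : PySem.List.slice chars.toList none (some 9) = chars.toList.take 9 := by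
      rw [PySem.List.slice_to chars.toList (by norm_num : (0:Int) ≤ 9)]
      rfl
    rw [hsl9]
    by_cases hf : PySem.Chars.find (chars.toList.take 9) [')'] = -1
    · rw [if_pos hf, if_pos hf]
    · have hge : 0 ≤ PySem.Chars.find (chars.toList.take 9) [')'] := by
        have := PySem.Chars.neg_one_le_find (s := chars.toList.take 9) (sub := [')'])
        omega
      rw [if_neg hf, if_neg hf, PySem.List.slice_to _ hge]
      split_ifs <;> rfl
  rw [hA, hB, core (chars.toList.take 9) hwne]

-- ===== VERDICT (by name: the statement is the Claim_ definition above) =====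
theorem seven_char_digit_pair_str_checker_spec : Claim_equal_seven_char_digit_pair_str_checker := by
  intro chars _ hpre
  exact seven_char_digit_pair_str_checker_spec_aux chars hpre
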